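-- pv_equiv track=rewrite | github.com/Keivou/nasa-cea-mole-fractions-parser | nasa_cea_parser.py | split_to_rows
-- ===== SOURCE A (Python) =====
-- def split_to_rows(table_list):
--     """
--     Splits a flat list of component names and mole fractions into a list of lists (rows).
--     """
--     table_rows = []
--     current_row = []
--
--     for item in table_list:
--         # Check if the item is a species name (i.e., NOT a number starting with '0')
--         # We also ensure the item isn't an empty string just in case.
--         if item and not item.startswith('0'):
--             # This is a new component name, so the previous row is complete.
--             if current_row:
--                 table_rows.append(current_row)
--
--             # Start a new row with the component name
--             current_row = [item]
--
--         # If the item starts with '0', it's a composition value.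
--         elif item:
--             # Add the composition value to the current row
--             current_row.append(item)
--
--     # Append the last row after the loop finishes
--     if current_row:
--         table_rows.append(current_row)
--
--     return table_rows
-- ===== SOURCE B (Python) =====
-- def split_to_rows(table_list):
--     """Build rows back-to-front: scan the list in reverse, collecting a row's
--     values and closing the row when its species name is met; a leftover
--     nameless row and the row list are put in order by final reversals."""
--     rows = []
--     cur = []
--     for item in reversed(table_list):
--         if not item:
--             continue
--         if item.startswith('0'):
--             cur.append(item)
--         else:
--             cur.append(item)
--             rows.append(cur[::-1])
--             cur = []
--     if cur:
--         rows.append(cur[::-1])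
--     rows.reverse()
--     return rows
-- ===== Notes on version B (the rewrite author's own statement) =====
-- stated objective: alternative
-- what changed: Replaces A's forward pass with a flush-on-next-name accumulator by a reverse scan that builds rows back-to-front, prepending values to the pending row and emitting it when its name is reached.
import Mathlib
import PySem

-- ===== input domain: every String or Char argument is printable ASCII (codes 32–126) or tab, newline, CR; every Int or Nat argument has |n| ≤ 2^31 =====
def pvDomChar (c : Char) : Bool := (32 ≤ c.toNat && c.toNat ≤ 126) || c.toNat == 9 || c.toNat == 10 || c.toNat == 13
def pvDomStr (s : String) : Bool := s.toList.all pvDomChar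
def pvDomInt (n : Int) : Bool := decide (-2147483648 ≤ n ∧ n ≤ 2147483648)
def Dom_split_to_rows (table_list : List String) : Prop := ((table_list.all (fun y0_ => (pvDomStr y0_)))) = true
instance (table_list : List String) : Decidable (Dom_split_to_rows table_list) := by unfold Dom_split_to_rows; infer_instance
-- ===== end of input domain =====

-- B replaces A's forward flush-on-next-name pass by a reverse scan that closes each row at its name (alternative decomposition, same cost).

-- ===== PORT A =====
-- A's loop body: state is (table_rows, current_row)
def stepA (st : List (List String) × List String) (item : String) : List (List String) × List String :=
  if item ≠ "" ∧ ¬ (PySem.Str.startswith item "0" = true) then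
    ((if st.2 ≠ [] then st.1 ++ [st.2] else st.1), [item])
  else if item ≠ "" then
    (st.1, st.2 ++ [item])
  else st

-- A's final append of the last row
def finishA (st : List (List String) × List String) : List (List String) :=
  if st.2 ≠ [] then st.1 ++ [st.2] else st.1

def split_to_rows (table_list : List String) : List (List String) :=
  finishA (table_list.foldl stepA ([], []))

-- ===== PORT B =====
-- B's loop body: state is (rows, cur); "for item in reversed(table_list)" is a foldl over table_list.reverse;
-- cur[::-1] is List.reverse (full reversing slice)
def stepB (st : List (List String) × List String) (item : String) : List (List String) × List String :=
  if item = "" then st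
  else if PySem.Str.startswith item "0" = true then (st.1, st.2 ++ [item])
  else (st.1 ++ [(st.2 ++ [item]).reverse], [])

def split_to_rows_alt (table_list : List String) : List (List String) :=
  let s := table_list.reverse.foldl stepB ([], [])
  (if s.2 ≠ [] then s.1 ++ [s.2.reverse] else s.1).reverse

-- ===== PRECONDITION & SPEC =====
def Spec_split_to_rows (table_list : List String) (out : List (List String)) : Prop := out = split_to_rows_alt table_list
instance (table_list : List String) (out : List (List String)) : Decidable (Spec_split_to_rows table_list out) := by unfold Spec_split_to_rows; infer_instance

-- ===== CLAIM (what is proved, stated in full; the proofs are below) =====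
def Claim_equal_split_to_rows : Prop := ∀ (table_list : List String), Dom_split_to_rows table_list → Spec_split_to_rows table_list (split_to_rows table_list)

-- ===== LEMMAS AND PROOFS =====

-- proof-only right-fold with state (cur, rows): the common reference both ports are reduced to
def stepC (item : String) (st : List String × List (List String)) : List String × List (List String) :=
  if item = "" then st
  else if PySem.Chars.startswith item.toList ['0'] = true then (item :: st.1, st.2)
  else ([], (item :: st.1) :: st.2)

-- Invariant for A: the forward fold from (rows, cur) yields rows, then the groups of l
-- with a pending cur merged into l's leading value-only prefix.
theorem keyA (l : List String) (rows : List (List String)) (cur : List String) :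
    finishA (l.foldl stepA (rows, cur)) =
      rows ++ (if cur ++ (l.foldr stepC ([], [])).1 = [] then (l.foldr stepC ([], [])).2
               else (cur ++ (l.foldr stepC ([], [])).1) :: (l.foldr stepC ([], [])).2) := by
  induction l generalizing rows cur with
  | nil =>
      simp only [List.foldl, List.foldr, finishA]
      by_cases h : cur = [] <;> simp [h]
  | cons x xs ih =>
      simp only [List.foldl, List.foldr]
      by_cases hx : x = ""
      · have hA : stepA (rows, cur) x = (rows, cur) := by simp [stepA, hx]
        have hC : stepC x (xs.foldr stepC ([], [])) = xs.foldr stepC ([], []) := by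
          simp [stepC, hx]
        rw [hA, hC]; exact ih rows cur
      · by_cases hz : PySem.Chars.startswith x.toList ['0'] = true
        · have hA : stepA (rows, cur) x = (rows, cur ++ [x]) := by
            simp [stepA, hx, hz]
          have hC : stepC x (xs.foldr stepC ([], [])) =
              (x :: (xs.foldr stepC ([], [])).1, (xs.foldr stepC ([], [])).2) := by
            simp [stepC, hx, hz]
          rw [hA, hC, ih]
          simp
        · have hA : stepA (rows, cur) x =
              ((if cur ≠ [] then rows ++ [cur] else rows), [x]) := by
            simp [stepA, hx, hz]
          have hC : stepC x (xs.foldr stepC ([], [])) =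
              ([], (x :: (xs.foldr stepC ([], [])).1) :: (xs.foldr stepC ([], [])).2) := by
            simp [stepC, hx, hz]
          rw [hA, hC, ih]
          by_cases hc : cur = [] <;> simp [hc]

-- Bridge for B: its reverse-order fold carries the reversed components of the stepC fold.
theorem keyB (l : List String) :
    l.foldr (fun x st => stepB st x) ([], []) =
      ((l.foldr stepC ([], [])).2.reverse, (l.foldr stepC ([], [])).1.reverse) := by
  induction l with
  | nil => simp
  | cons x xs ih =>
      simp only [List.foldr, ih]
      by_cases hx : x = ""
      · simp [stepB, stepC, hx]
      · by_cases hz : PySem.Chars.startswith x.toList ['0'] = true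
        · simp [stepB, stepC, hx, hz]
        · simp [stepB, stepC, hx, hz]

-- ===== VERDICT (by name: the statement is the Claim_ definition above) =====
theorem split_to_rows_spec : Claim_equal_split_to_rows := by
  intro l _
  unfold Spec_split_to_rows split_to_rows split_to_rows_alt
  rw [keyA, List.foldl_reverse, keyB]
  by_cases h : (l.foldr stepC ([], [])).1 = [] <;> simp [h]
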